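-- pv_equiv track=rewrite | github.com/pretalx/pretalx | src/pretalx/orga/views/cfp.py | _get_ordered_field_keys
-- ===== SOURCE A (Python) =====
-- def _get_ordered_field_keys(fields_config, step_fields, always_required=None):
--     always_required = always_required or set()
--     if fields_config:
--         ordered_keys = [f.get("key") for f in fields_config if f.get("key")]
--         for key in step_fields:
--             if key not in ordered_keys:
--                 if key in always_required:
--                     ordered_keys.insert(0, key)
--                 else:
--                     ordered_keys.append(key)
--     else:
--         ordered_keys = list(step_fields)
--     return ordered_keys
-- ===== SOURCE B (Python) =====
-- def _get_ordered_field_keys(fields_config, step_fields, always_required=None):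
--     always_required = always_required or set()
--     if not fields_config:
--         return list(step_fields)
--     ordered_keys = [f.get("key") for f in fields_config if f.get("key")]
--     known = set(ordered_keys)
--     missing = list(dict.fromkeys(k for k in step_fields if k not in known))
--     prepended = [k for k in missing if k in always_required]
--     appended = [k for k in missing if k not in always_required]
--     return prepended[::-1] + ordered_keys + appended
-- ===== Notes on version B (the rewrite author's own statement) =====
-- stated objective: alternative
-- what changed: B replaces A's single in-place loop (membership re-scan of the growing list plus insert(0)/append per key) with staged whole-list passes: filter out known config keys, dedup the rest with dict.fromkeys, split that missing list into prepended/appended by always_required with two comprehensions, and concatenate prepended[::-1] + ordered_keys + appended once.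
import Mathlib
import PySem

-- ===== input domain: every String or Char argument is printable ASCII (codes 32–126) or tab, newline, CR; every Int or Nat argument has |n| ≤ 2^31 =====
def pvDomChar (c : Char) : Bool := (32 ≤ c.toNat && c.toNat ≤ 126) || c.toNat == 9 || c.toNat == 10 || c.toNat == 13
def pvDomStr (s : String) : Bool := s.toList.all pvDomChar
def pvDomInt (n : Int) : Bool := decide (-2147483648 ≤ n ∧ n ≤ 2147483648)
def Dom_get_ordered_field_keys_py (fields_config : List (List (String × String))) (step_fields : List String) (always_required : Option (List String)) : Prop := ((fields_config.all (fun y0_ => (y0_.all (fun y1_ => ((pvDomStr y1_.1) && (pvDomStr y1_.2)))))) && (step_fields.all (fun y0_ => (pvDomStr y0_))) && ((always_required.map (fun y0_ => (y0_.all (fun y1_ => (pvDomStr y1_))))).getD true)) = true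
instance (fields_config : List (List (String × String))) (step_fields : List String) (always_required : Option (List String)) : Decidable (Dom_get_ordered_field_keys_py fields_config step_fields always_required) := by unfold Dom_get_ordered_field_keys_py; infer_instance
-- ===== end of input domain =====

-- ===== PORT A =====
-- ONE LINE: B replaces A's in-place mutating loop by staged whole-list passes
-- (filter known keys, dedup, split by always_required, concatenate once); objective: alternative decomposition.
-- f.get("key") truthy check: present and non-empty string
def pvKeyOf (f : List (String × String)) : Option String :=
  match PySem.Dict.get? (PySem.Dict.mk f) "key" with
  | some s => if s ≠ "" then some s else none
  | none => none

def get_ordered_field_keys_py (fields_config : List (List (String × String))) (step_fields : List String) (always_required : Option (List String)) : List String :=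
  let ar : List String := always_required.getD []   -- 'always_required or set()': membership-equivalent
  if fields_config ≠ [] then
    let ordered_keys := fields_config.filterMap pvKeyOf
    step_fields.foldl (fun acc key =>
      if acc.contains key then acc
      else if ar.contains key then key :: acc   -- ordered_keys.insert(0, key)
      else acc ++ [key]) ordered_keys
  else step_fields

-- ===== PORT B =====
def get_ordered_field_keys_py_alt (fields_config : List (List (String × String))) (step_fields : List String) (always_required : Option (List String)) : List String :=
  let ar : List String := always_required.getD []
  if fields_config = [] then step_fields
  else
    let ordered_keys := fields_config.filterMap pvKeyOf
    let known : PySem.Set String := PySem.Set.ofList ordered_keys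
    let missing := PySem.List.dedup (step_fields.filter (fun k => !(PySem.Set.contains known k)))
    let prepended := missing.filter (fun k => ar.contains k)
    let appended := missing.filter (fun k => !(ar.contains k))
    prepended.reverse ++ ordered_keys ++ appended

-- ===== PRECONDITION & SPEC =====
def Spec_get_ordered_field_keys_py (fields_config : List (List (String × String))) (step_fields : List String) (always_required : Option (List String)) (out : List String) : Prop := out = get_ordered_field_keys_py_alt fields_config step_fields always_required
instance (fields_config : List (List (String × String))) (step_fields : List String) (always_required : Option (List String)) (out : List String) : Decidable (Spec_get_ordered_field_keys_py fields_config step_fields always_required out) := by unfold Spec_get_ordered_field_keys_py; infer_instance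

-- ===== CLAIM =====
def Claim_equal_get_ordered_field_keys_py : Prop := ∀ (fields_config : List (List (String × String))) (step_fields : List String) (always_required : Option (List String)), Dom_get_ordered_field_keys_py fields_config step_fields always_required → Spec_get_ordered_field_keys_py fields_config step_fields always_required (get_ordered_field_keys_py fields_config step_fields always_required)

-- ===== LEMMAS AND PROOFS =====
-- sieve s keys: first occurrences of keys not in s, in order (the 'new' keys as A discovers them).
def pvSieve (s : List String) : List String → List String
  | [] => []
  | k :: ks => if k ∈ s then pvSieve s ks else k :: pvSieve (s ++ [k]) ks

theorem pvSieve_congr (keys : List String) : ∀ (s t : List String),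
    (∀ k, k ∈ s ↔ k ∈ t) → pvSieve s keys = pvSieve t keys := by
  induction keys with
  | nil => intro s t _; rfl
  | cons k ks ih =>
    intro s t h
    simp only [pvSieve]
    by_cases hk : k ∈ s
    · rw [if_pos hk, if_pos ((h k).mp hk)]
      exact ih s t h
    · rw [if_neg hk, if_neg (fun c => hk ((h k).mpr c))]
      refine congrArg (k :: ·) (ih _ _ ?_)
      intro x; simp only [List.mem_append, List.mem_singleton]
      exact or_congr (h x) Iff.rfl

-- Set.ofList's foldl, started from any accumulator, appends exactly the sieve.
theorem pvFoldl_add_eq_append_sieve (keys : List String) : ∀ (acc : List String),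
    keys.foldl PySem.Set.add acc = acc ++ pvSieve acc keys := by
  induction keys with
  | nil => intro acc; simp [pvSieve]
  | cons k ks ih =>
    intro acc
    simp only [List.foldl_cons, pvSieve, PySem.Set.add]
    by_cases hk : k ∈ acc
    · rw [if_pos ((PySem.Set.contains_iff _ _).mpr hk), if_pos hk, ih]
    · rw [if_neg (fun c => hk ((PySem.Set.contains_iff _ _).mp c)), if_neg hk, ih,
        List.append_assoc]
      simp

-- Filtering away members of S before sieving from u equals sieving from u ++ S.
theorem pvSieve_filter (keys : List String) : ∀ (u S : List String),
    pvSieve u (keys.filter (fun k => !(PySem.Set.contains S k))) = pvSieve (u ++ S) keys := by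
  induction keys with
  | nil => intro u S; rfl
  | cons k ks ih =>
    intro u S
    simp only [List.filter_cons]
    by_cases hS : k ∈ S
    · have hc : PySem.Set.contains S k = true := (PySem.Set.contains_iff S k).mpr hS
      rw [hc]
      simp only [Bool.not_true, Bool.false_eq_true, if_false, pvSieve]
      rw [if_pos (List.mem_append.mpr (Or.inr hS))]
      exact ih u S
    · have hc : PySem.Set.contains S k = false := by
        by_cases h2 : PySem.Set.contains S k = true
        · exact absurd ((PySem.Set.contains_iff _ _).mp h2) hS
        · exact Bool.eq_false_iff.mpr h2
      rw [hc]
      simp only [Bool.not_false, if_true, pvSieve]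
      by_cases hu : k ∈ u
      · rw [if_pos hu, if_pos (List.mem_append.mpr (Or.inl hu))]
        exact ih u S
      · rw [if_neg hu, if_neg (fun c => (List.mem_append.mp c).elim hu hS)]
        refine congrArg (k :: ·) ?_
        rw [ih (u ++ [k]) S, pvSieve_congr ks (u ++ [k] ++ S) (u ++ S ++ [k])]
        intro x; simp only [List.mem_append, List.mem_singleton]; tauto

-- Main loop characterisation of A: the fold splits into prepended-reversed / base / appended.
theorem pv_loop (ar : List String) (keys : List String) :
    ∀ (pre base app s : List String),
    (∀ k : String, (k ∈ pre ∨ k ∈ base ∨ k ∈ app) ↔ k ∈ s) →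
    keys.foldl (fun acc key =>
      if acc.contains key then acc
      else if ar.contains key then key :: acc
      else acc ++ [key]) (pre.reverse ++ base ++ app)
    = (pre ++ (pvSieve s keys).filter (fun k => ar.contains k)).reverse ++ base ++
        (app ++ (pvSieve s keys).filter (fun k => !(ar.contains k))) := by
  induction keys with
  | nil => intro pre base app s _; simp [pvSieve]
  | cons key rest ih =>
    intro pre base app s hinv
    simp only [List.foldl_cons, pvSieve]
    by_cases hk : key ∈ s
    · have hA : (pre.reverse ++ base ++ app).contains key = true := by
        simp only [List.contains_eq_mem, List.mem_append, List.mem_reverse, decide_eq_true_eq]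
        have := (hinv key).mpr hk; tauto
      rw [hA, if_pos hk]
      simp only [if_true]
      exact ih pre base app s hinv
    · have hA : (pre.reverse ++ base ++ app).contains key = false := by
        simp only [List.contains_eq_mem, List.mem_append, List.mem_reverse,
          decide_eq_false_iff_not]
        intro h; exact hk ((hinv key).mp (by tauto))
      rw [hA, if_neg hk]
      simp only [Bool.false_eq_true, if_false]
      have hinv' : ∀ k : String,
          (k ∈ pre ++ [key] ∨ k ∈ base ∨ k ∈ app) ↔ k ∈ s ++ [key] := by
        intro k
        simp only [List.mem_append, List.mem_singleton]
        have := hinv k; tauto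
      have hinv'' : ∀ k : String,
          (k ∈ pre ∨ k ∈ base ∨ k ∈ app ++ [key]) ↔ k ∈ s ++ [key] := by
        intro k
        simp only [List.mem_append, List.mem_singleton]
        have := hinv k; tauto
      by_cases har : ar.contains key = true
      · rw [har, List.filter_cons_of_pos har,
          List.filter_cons_of_neg (by rw [har]; simp)]
        simp only [if_true]
        have heq : key :: (pre.reverse ++ base ++ app)
            = (pre ++ [key]).reverse ++ base ++ app := by simp
        rw [heq, ih (pre ++ [key]) base app (s ++ [key]) hinv']
        simp only [List.append_assoc, List.singleton_append]
      · have har' : ar.contains key = false := Bool.eq_false_iff.mpr har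
        rw [har', List.filter_cons_of_neg (by rw [har']; simp),
          List.filter_cons_of_pos (by rw [har']; rfl)]
        simp only [Bool.false_eq_true, if_false]
        have heq : (pre.reverse ++ base ++ app) ++ [key]
            = pre.reverse ++ base ++ (app ++ [key]) := by simp
        rw [heq, ih pre base (app ++ [key]) (s ++ [key]) hinv'']
        simp only [List.append_assoc, List.singleton_append]

-- ===== VERDICT =====
theorem get_ordered_field_keys_py_spec : Claim_equal_get_ordered_field_keys_py := by
  intro fc sf ar _
  unfold Spec_get_ordered_field_keys_py get_ordered_field_keys_py get_ordered_field_keys_py_alt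
  by_cases hfc : fc = []
  · simp [hfc]
  · simp only [hfc, ne_eq, not_false_eq_true, if_true]
    set base := fc.filterMap pvKeyOf with hbase
    have hmissing : PySem.List.dedup
        (sf.filter (fun k => !(PySem.Set.contains (PySem.Set.ofList base) k)))
        = pvSieve base sf := by
      rw [PySem.List.dedup_eq_ofList, PySem.Set.ofList_eq_foldl,
        pvFoldl_add_eq_append_sieve, List.nil_append,
        pvSieve_filter sf [] (PySem.Set.ofList base), List.nil_append]
      exact pvSieve_congr sf _ _ (fun k => PySem.Set.mem_ofList base k)
    have hmain := pv_loop (ar.getD []) sf [] base [] base (by intro k; simp)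
    simp only [List.reverse_nil, List.nil_append, List.append_nil] at hmain
    rw [hmain, hmissing]
    simp
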